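-- pv_equiv track=rewrite | github.com/ASSERT-KTH/Mokav | experiments/pynguin/c4b/single-return/generated_tests/src_1827/1/src_1827.py | func
-- ===== SOURCE A (Python) =====
-- def func(*args):
--
-- 	n = int(args[0])
-- 	hate_str = 'I hate '
-- 	love_str = 'I love '
-- 	feeling = ''
-- 	for i in range(0, n):
-- 	    if (i % 2):
-- 	        feeling += love_str
-- 	    else:
-- 	        feeling += hate_str
-- 	    if (i != (n - 1)):
-- 	        feeling += 'that '
-- 	feeling += 'it'
-- 	return(feeling)
-- ===== SOURCE B (Python) =====
-- def func(*args):
--     n = int(args[0])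
--     if n <= 0:
--         return 'it'
--     period = 'I hate that I love that '
--     return (period * ((n + 1) // 2))[:12 * n - 5] + 'it'
-- ===== Notes on version B (the rewrite author's own statement) =====
-- stated objective: faster
-- what changed: B exploits that the output is periodic: it builds the repetition of the period 'I hate that I love that ' once, slices off the needed prefix and appends 'it', replacing A's per-index loop with its parity branch and conditional separator append on a growing string.
import Mathlib
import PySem

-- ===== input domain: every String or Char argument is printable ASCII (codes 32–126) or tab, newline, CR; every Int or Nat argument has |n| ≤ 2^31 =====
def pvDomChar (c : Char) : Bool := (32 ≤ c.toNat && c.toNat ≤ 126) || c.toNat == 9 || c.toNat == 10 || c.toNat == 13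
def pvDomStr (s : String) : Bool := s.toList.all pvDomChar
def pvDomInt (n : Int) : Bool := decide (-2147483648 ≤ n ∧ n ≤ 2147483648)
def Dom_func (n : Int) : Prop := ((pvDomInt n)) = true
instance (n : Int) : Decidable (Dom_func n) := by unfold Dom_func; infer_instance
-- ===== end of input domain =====

-- B replaces A's per-iteration loop entirely: the output is periodic, so B repeats
-- the period "I hate that I love that ", slices off the needed prefix and appends
-- 'it' (objective: faster, measured).

-- ===== PORT A =====
def func (n : Int) : String :=
  let hate_str := "I hate "
  let love_str := "I love "
  let feeling := (PySem.List.pyRange 0 n 1).foldl (fun feeling i =>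
    let feeling := if i % 2 ≠ 0 then feeling ++ love_str else feeling ++ hate_str
    if i ≠ n - 1 then feeling ++ "that " else feeling) ""
  feeling ++ "it"

-- ===== PORT B =====
-- 'period * m' (Python string repetition) is ported as PySem.List.pyRepeat on the
-- code points, and the slice '[:12*n-5]' as PySem.List.slice; exact on all inputs.
def func_alt (n : Int) : String :=
  if n ≤ 0 then "it"
  else
    let period := "I hate that I love that "
    String.ofList (PySem.List.slice
      (PySem.List.pyRepeat period.toList (PySem.Int.floordiv (n + 1) 2))
      none (some (12 * n - 5))) ++ "it"

-- ===== PRECONDITION & SPEC =====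
def Spec_func (n : Int) (out : String) : Prop := out = func_alt n
instance (n : Int) (out : String) : Decidable (Spec_func n out) := by unfold Spec_func; infer_instance

-- ===== CLAIM (what is proved, stated in full; the proofs are below) =====
def Claim_equal_func : Prop := ∀ (n : Int), Dom_func n → Spec_func n (func n)

-- ===== LEMMAS AND PROOFS =====

-- A's loop step, named for the proofs (same term as in the port).
def pvStep (n : Int) (feeling : String) (i : Int) : String :=
  let feeling := if i % 2 ≠ 0 then feeling ++ "I love " else feeling ++ "I hate "
  if i ≠ n - 1 then feeling ++ "that " else feeling

def pvWord (i : Int) : String := if i % 2 == 0 then "I hate " else "I love "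

def pvWordN (i : Nat) : List Char :=
  if i % 2 = 0 then "I hate ".toList else "I love ".toList

theorem pvWord_toList (i : Int) :
    (pvWord i).toList = if i % 2 ≠ 0 then "I love ".toList else "I hate ".toList := by
  unfold pvWord
  by_cases h : i % 2 = 0 <;> simp [h]

-- A-side loop invariant: folding A's step over range a..n starting from s appends
-- exactly the 'that '-join of the alternating words for that range.
theorem pvLoop (n : Int) (k : Nat) : ∀ (a : Int) (s : String), (n - a).toNat = k →
    ((PySem.List.pyRange a n 1).foldl (pvStep n) s).toList =
      s.toList ++ (PySem.Str.join "that " ((PySem.List.pyRange a n 1).map pvWord)).toList := by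
  induction k with
  | zero =>
    intro a s h
    have hna : n ≤ a := by omega
    simp [PySem.List.pyRange_one_eq_nil hna, PySem.Str.toList_join, PySem.Chars.join_nil]
  | succ k ih =>
    intro a s h
    have han : a < n := by omega
    rw [PySem.List.pyRange_one_cons han]
    by_cases hlast : a = n - 1
    · have hnil : PySem.List.pyRange (a + 1) n 1 = [] := by
        apply PySem.List.pyRange_one_eq_nil; omega
      simp only [List.foldl_cons, List.map_cons, hnil, List.foldl_nil, List.map_nil,
        PySem.Str.toList_join, PySem.Chars.join_singleton]
      unfold pvStep
      simp only [hlast]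
      by_cases h2 : (n - 1) % 2 = 0 <;>
        simp [h2, pvWord_toList]
    · have hrest : PySem.List.pyRange (a + 1) n 1 ≠ [] := by
        have : a + 1 ∈ PySem.List.pyRange (a + 1) n 1 := by
          rw [PySem.List.mem_pyRange_one]; omega
        intro hc; rw [hc] at this; exact absurd this (List.not_mem_nil)
      obtain ⟨q, rest, hqr⟩ := List.exists_cons_of_ne_nil hrest
      have hstep : (pvStep n s a).toList = s.toList ++ (pvWord a).toList ++ "that ".toList := by
        unfold pvStep
        by_cases h2 : a % 2 = 0 <;> simp [h2, hlast, pvWord_toList]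
      have ih' := ih (a + 1) (pvStep n s a) (by omega)
      simp only [List.foldl_cons]
      rw [ih', hstep, hqr]
      simp only [PySem.Str.toList_join, List.map_cons]
      rw [PySem.Chars.join_cons_cons]
      simp

theorem pvWordN_add_two (i : Nat) : pvWordN (2 + i) = pvWordN i := by
  unfold pvWordN
  have : (2 + i) % 2 = i % 2 := by omega
  rw [this]

-- B-side closed form: the first 12*k-5 chars of the repeated period are exactly
-- the 'that '-join of the first k alternating words.
theorem pvRep (k : Nat) (hk : 1 ≤ k) :
    ((List.replicate ((k + 1) / 2) "I hate that I love that ".toList).flatten).take (12 * k - 5) =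
      PySem.Chars.join "that ".toList ((List.range k).map pvWordN) := by
  induction k using Nat.strong_induction_on with
  | _ k ih =>
    match k, hk with
    | 1, _ => decide
    | 2, _ => decide
    | (m + 3), _ =>
      have hm : 1 ≤ m + 1 := by omega
      have ihm := ih (m + 1) (by omega) hm
      -- left side: peel one period off the front
      have hdiv : (m + 3 + 1) / 2 = (m + 1 + 1) / 2 + 1 := by omega
      rw [hdiv, List.replicate_succ, List.flatten_cons]
      have hlen : 12 * (m + 3) - 5 =
          ("I hate that I love that ".toList).length + (12 * (m + 1) - 5) := by
        simp; omega
      rw [hlen, List.take_append, Nat.add_sub_cancel_left,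
        List.take_of_length_le (Nat.le_add_right _ _), ihm]
      -- right side: peel the first two words off the join
      have hrange : List.range (m + 3) =
          List.range 2 ++ (List.range (m + 1)).map (2 + ·) := by
        have : m + 3 = 2 + (m + 1) := by omega
        rw [this, List.range_add]
      rw [hrange, List.map_append, List.map_map]
      have hshift : (List.range (m + 1)).map (pvWordN ∘ (2 + ·)) =
          (List.range (m + 1)).map pvWordN := by
        apply List.map_congr_left
        intro i _
        exact pvWordN_add_two i
      rw [hshift]
      have hrange2 : (List.range 2).map pvWordN = ["I hate ".toList, "I love ".toList] := by
        decide
      rw [hrange2]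
      obtain ⟨q, rest, hqr⟩ :
          ∃ q rest, (List.range (m + 1)).map pvWordN = q :: rest := by
        have : m + 1 = m + 1 := rfl
        cases h : (List.range (m + 1)).map pvWordN with
        | nil =>
          exfalso
          have := congrArg List.length h
          simp at this
        | cons q rest => exact ⟨q, rest, rfl⟩
      rw [hqr, List.cons_append, List.cons_append, List.nil_append]
      rw [PySem.Chars.join_cons_cons, PySem.Chars.join_cons_cons]
      simp

-- Bridge: the Int-indexed words of A's range are the Nat-indexed words.
theorem pvWords_bridge (n : Int) :
    ((PySem.List.pyRange 0 n 1).map pvWord).map String.toList =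
      (List.range n.toNat).map pvWordN := by
  rw [PySem.List.pyRange_one]
  simp only [List.map_map, Int.sub_zero]
  apply List.map_congr_left
  intro k _
  show (pvWord (0 + (k : Int))).toList = pvWordN k
  rw [pvWord_toList]
  unfold pvWordN
  by_cases h : k % 2 = 0
  · have h1 : ¬ (0 + (k : Int)) % 2 ≠ 0 := by omega
    rw [if_neg h1, if_pos h]
  · have h1 : (0 + (k : Int)) % 2 ≠ 0 := by omega
    rw [if_pos h1, if_neg h]

-- ===== VERDICT (by name: the statement is the Claim_ definition above) =====
theorem func_spec : Claim_equal_func := by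
  intro n _
  unfold Spec_func func func_alt
  have hstep : (fun (feeling : String) (i : Int) =>
      let feeling := if i % 2 ≠ 0 then feeling ++ "I love " else feeling ++ "I hate "
      if i ≠ n - 1 then feeling ++ "that " else feeling) = pvStep n := by
    funext s i; rfl
  by_cases hn : n ≤ 0
  · simp only [hn, if_pos, hstep]
    rw [PySem.List.pyRange_one_eq_nil hn]
    simp
  · simp only [if_neg hn]
    apply String.toList_inj.mp
    have hA := pvLoop n (n - 0).toNat 0 "" rfl
    simp only [hstep, String.toList_append]
    rw [hA]
    -- rewrite B's slice and fdiv into Nat take / replicate form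
    have hb : (0 : Int) ≤ 12 * n - 5 := by omega
    rw [PySem.List.slice_to _ hb]
    have hfd : (PySem.Int.floordiv (n + 1) 2).toNat = (n.toNat + 1) / 2 := by
      unfold PySem.Int.floordiv
      rw [Int.fdiv_eq_ediv]; simp; omega
    have htn : (12 * n - 5).toNat = 12 * n.toNat - 5 := by omega
    unfold PySem.List.pyRepeat
    rw [hfd, htn, pvRep n.toNat (by omega)]
    have hjoin := PySem.Str.toList_join "that " ((PySem.List.pyRange 0 n 1).map pvWord)
    rw [hjoin, List.map_map]
    have := pvWords_bridge n
    rw [List.map_map] at this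
    rw [this]
    simp
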